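-- pv_equiv track=rewrite | github.com/rahul38888/coding_practice | src/practices/practice/palindromnot/palindromnot.py | transform_palindrom
-- ===== SOURCE A (Python) =====
-- def transform_palindrom(pal):
--     countMap = {}
--     for c in pal:
--         countVal = 0
--         try:
--             countVal = countMap[c]
--         except KeyError:
--             pass
--         countVal += 1
--         countMap[c] = countVal
--
--     resultString = ""
--     for key in countMap.keys():
--         resultString += key*countMap[key]
--     return resultString
-- ===== SOURCE B (Python) =====
-- def transform_palindrom(pal):
--     if not pal:
--         return ""
--     c = pal[0]
--     return c * pal.count(c) + transform_palindrom(pal.replace(c, ""))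
-- ===== Notes on version B (the rewrite author's own statement) =====
-- stated objective: alternative
-- what changed: Replaces A's dict-counting pass plus keys-emit loop with a recursive extraction: take the first character, emit it count(c) times, strip all its occurrences with replace, and recurse on the rest; no dictionary at all.
import Mathlib
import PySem

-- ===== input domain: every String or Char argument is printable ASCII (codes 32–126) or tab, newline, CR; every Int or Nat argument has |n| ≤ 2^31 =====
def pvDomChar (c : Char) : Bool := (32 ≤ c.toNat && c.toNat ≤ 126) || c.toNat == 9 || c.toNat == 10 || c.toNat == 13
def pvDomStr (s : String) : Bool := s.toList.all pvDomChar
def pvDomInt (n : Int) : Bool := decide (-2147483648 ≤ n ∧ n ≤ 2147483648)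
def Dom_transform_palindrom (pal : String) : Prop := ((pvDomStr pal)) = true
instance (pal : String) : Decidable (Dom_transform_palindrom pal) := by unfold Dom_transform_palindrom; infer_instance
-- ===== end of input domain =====

-- B replaces A's dict-counting pass with a recursive extraction (emit first char times its count, strip it via replace, recurse); same return value, no speed claim.


-- ===== PORT A =====
def transform_palindrom (pal : String) : String :=
  -- countMap loop: try-lookup (KeyError → 0), +1, store back
  let countMap : PySem.Dict Char Int :=
    pal.toList.foldl (fun d c => d.insert c (d.getD c 0 + 1)) PySem.Dict.empty
  -- resultString loop over countMap.keys(), appending key*countMap[key]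
  let resultString : List Char :=
    countMap.keys.foldl (fun s k => s ++ PySem.List.pyRepeat [k] (countMap.getD k 0)) []
  String.ofList resultString

-- ===== PORT B =====
-- B's recursion on the string, over List Char: c = pal[0]; c * pal.count(c) (str.count of a
-- single character = list count, exact) ++ recurse on pal.replace(c, "") (= drop every
-- occurrence of c, exact: filter (· ≠ c)).
def tpAltRec : List Char → List Char
  | [] => []                                      -- if not pal: return ""
  | c :: t =>
      PySem.List.pyRepeat [c] (((c :: t).count c : Int)) ++
        tpAltRec ((c :: t).filter (fun x => x ≠ c))
  termination_by l => l.length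
  decreasing_by
    simp only [List.filter_cons, decide_not, ne_eq]
    simp only [decide_true, Bool.not_true, Bool.false_eq_true, if_false, List.length_cons]
    exact Nat.lt_succ_of_le (List.length_filter_le _ _)

def transform_palindrom_alt (pal : String) : String :=
  String.ofList (tpAltRec pal.toList)

-- ===== PRECONDITION & SPEC =====
def Spec_transform_palindrom (pal : String) (out : String) : Prop := out = transform_palindrom_alt pal
instance (pal : String) (out : String) : Decidable (Spec_transform_palindrom pal out) := by unfold Spec_transform_palindrom; infer_instance

-- ===== CLAIM (what is proved, stated in full; the proofs are below) =====
def Claim_equal_transform_palindrom : Prop := ∀ (pal : String), Dom_transform_palindrom pal → Spec_transform_palindrom pal (transform_palindrom pal)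

-- ===== LEMMAS AND PROOFS =====

-- filtering commutes with ordered dedup (first occurrences)
theorem ofList_filter (p : Char → Bool) (t : List Char) :
    (PySem.Set.ofList t).filter p = PySem.Set.ofList (t.filter p) := by
  induction t with
  | nil => rfl
  | cons x t ih =>
    rw [PySem.Set.ofList_cons, List.filter_cons, List.filter_cons]
    by_cases hp : p x
    · rw [if_pos hp, if_pos hp, PySem.Set.ofList_cons]
      show x :: List.filter p (PySem.Set.discard (PySem.Set.ofList t) x)
          = x :: PySem.Set.discard (PySem.Set.ofList (t.filter p)) x
      unfold PySem.Set.discard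
      rw [← ih, List.filter_filter, List.filter_filter,
        show (fun a => p a && !(a == x)) = (fun a => !(a == x) && p a) from
          funext (fun a => Bool.and_comm _ _)]
    · rw [if_neg hp, if_neg hp]
      show List.filter p (PySem.Set.discard (PySem.Set.ofList t) x)
          = PySem.Set.ofList (t.filter p)
      unfold PySem.Set.discard
      rw [List.filter_filter, ← ih]
      congr 1
      funext a
      by_cases ha : p a
      · have : (a == x) = false := by
          apply beq_eq_false_iff_ne.mpr; rintro rfl; exact hp ha
        simp [ha, this]
      · simp [ha]

-- the grouped-by-count emission over first-seen distinct characters IS B's recursion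
theorem tp_rec_lemma (l : List Char) :
    (PySem.Set.ofList l).flatMap (fun c => PySem.List.pyRepeat [c] ((l.count c : Int))) = tpAltRec l := by
  induction hn : l.length using Nat.strong_induction_on generalizing l with
  | _ n ih =>
    match l with
    | [] => simp [tpAltRec]
    | c :: t =>
      rw [tpAltRec, PySem.Set.ofList_cons, List.flatMap_cons]
      congr 1
      have hdisc : PySem.Set.discard (PySem.Set.ofList t) c
          = PySem.Set.ofList (((c :: t).filter (fun x => x ≠ c))) := by
        show (PySem.Set.ofList t).filter (fun y => !(y == c)) = _
        rw [ofList_filter, List.filter_cons]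
        simp only [ne_eq, not_true_eq_false, decide_false, Bool.false_eq_true, if_false]
        congr 1
        apply List.filter_congr
        intro y _
        simp [decide_not, Bool.beq_eq_decide_eq]
      rw [hdisc]
      have hlen : ((c :: t).filter (fun x => x ≠ c)).length < n := by
        subst hn
        simp only [List.filter_cons, ne_eq, not_true_eq_false, decide_false,
          List.length_cons, Bool.false_eq_true, if_false]
        exact Nat.lt_succ_of_le (List.length_filter_le _ _)
      rw [← ih _ hlen _ rfl]
      apply List.flatMap_congr
      intro x hx
      have hxmem : x ∈ (c :: t).filter (fun x => x ≠ c) := (PySem.Set.mem_ofList _ _).mp hx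
      have hxc : x ≠ c := by
        have := List.of_mem_filter hxmem
        simpa using this
      have : ((c :: t).filter (fun x => x ≠ c)).count x = (c :: t).count x :=
        List.count_filter (by simpa using hxc)
      rw [this]

theorem tp_main (pal : String) : transform_palindrom pal = transform_palindrom_alt pal := by
  unfold transform_palindrom transform_palindrom_alt
  simp only [PySem.Dict.foldl_insert_getD_add_one_eq_counter, PySem.Dict.keys_counter,
    PySem.Dict.getD_counter, PySem.List.foldl_append_eq_flatMap, List.nil_append]
  rw [tp_rec_lemma]

-- ===== VERDICT (by name: the statement is the Claim_ definition above) =====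
theorem transform_palindrom_spec : Claim_equal_transform_palindrom := by
  intro pal _
  unfold Spec_transform_palindrom
  exact tp_main pal
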